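-- pv_equiv track=rewrite | github.com/thomas-ratz/Pixeldrain-to-m3u | src/pixeldrain_m3u/playlist.py | _order_attributes
-- ===== SOURCE A (Python) =====
-- from typing import Mapping, Sequence
--
-- PREFERRED_ATTR_ORDER = (
--     "tvg-id",
--     "tvg-name",
--     "tvg-logo",
--     "group-title",
-- )
--
-- def _order_attributes(attrs: Mapping[str, str | None]) -> list[tuple[str, str]]:
--     ordered: list[tuple[str, str]] = []
--     used = set()
--     for key in PREFERRED_ATTR_ORDER:
--         if key in attrs and attrs[key] is not None:
--             ordered.append((key, attrs[key]))
--             used.add(key)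
--     for key, value in attrs.items():
--         if key in used or value is None:
--             continue
--         ordered.append((key, value))
--     return ordered
-- ===== SOURCE B (Python) =====
-- PREFERRED_ATTR_ORDER = (
--     "tvg-id",
--     "tvg-name",
--     "tvg-logo",
--     "group-title",
-- )
--
-- def _rank(key):
--     try:
--         return PREFERRED_ATTR_ORDER.index(key)
--     except ValueError:
--         return len(PREFERRED_ATTR_ORDER)
--
-- def _order_attributes(attrs):
--     pairs = [(k, v) for k, v in attrs.items() if v is not None]
--     return sorted(pairs, key=lambda kv: _rank(kv[0]))
-- ===== Notes on version B (the rewrite author's own statement) =====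
-- stated objective: idiomatic
-- what changed: Replaces A's two explicit passes with a 'used' set by a single filtered comprehension followed by one stable sort keyed on the key's index in PREFERRED_ATTR_ORDER (non-preferred keys share the fallback rank, so stability keeps their insertion order).
import Mathlib
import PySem

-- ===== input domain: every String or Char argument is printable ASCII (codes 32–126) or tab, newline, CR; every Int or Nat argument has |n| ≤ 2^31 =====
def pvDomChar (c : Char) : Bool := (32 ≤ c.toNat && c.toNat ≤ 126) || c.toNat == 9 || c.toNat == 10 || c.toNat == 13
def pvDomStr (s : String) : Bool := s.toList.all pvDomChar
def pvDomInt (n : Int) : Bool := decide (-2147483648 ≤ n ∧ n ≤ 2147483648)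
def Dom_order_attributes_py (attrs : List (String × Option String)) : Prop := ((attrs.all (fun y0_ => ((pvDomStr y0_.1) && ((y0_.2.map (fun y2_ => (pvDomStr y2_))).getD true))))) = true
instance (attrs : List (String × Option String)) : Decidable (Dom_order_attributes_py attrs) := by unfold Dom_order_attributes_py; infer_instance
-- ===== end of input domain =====

-- B replaces A's two explicit passes (preferred keys first, then the rest guarded by a 'used' set)
-- by one filtered comprehension followed by a single stable sort keyed on the key's index in
-- PREFERRED_ATTR_ORDER (objective: idiomatic; not claimed faster).

-- PREFERRED_ATTR_ORDER (module constant used by both implementations)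
def pvPref : List String := ["tvg-id", "tvg-name", "tvg-logo", "group-title"]

-- ===== PORT A =====
def order_attributes_py (attrs : List (String × Option String)) : List (String × String) :=
  let st := pvPref.foldl (fun (st : List (String × String) × PySem.Set String) key =>
      match List.lookup key attrs with
      | some (some v) => (st.1 ++ [(key, v)], st.2.add key)
      | _ => st) ([], PySem.Set.ofList [])
  attrs.foldl (fun acc kv =>
      if kv.1 ∈ st.2 ∨ kv.2 = none then acc
      else match kv.2 with
           | some v => acc ++ [(kv.1, v)]
           | none => acc) st.1

-- ===== PORT B =====
def pvRank (key : String) : Nat := (PySem.List.index? pvPref key).getD pvPref.length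

def order_attributes_py_alt (attrs : List (String × Option String)) : List (String × String) :=
  let pairs := attrs.filterMap (fun kv => kv.2.map (fun v => (kv.1, v)))
  PySem.List.sorted pairs (fun kv => pvRank kv.1) false

-- ===== PRECONDITION & SPEC =====
-- Pre_ excludes association lists with duplicate keys: they never arise from a Python dict
-- (dict construction collapses duplicates before A runs), so any port behaviour there is accidental.
def Pre_order_attributes_py (attrs : List (String × Option String)) : Prop :=
  (attrs.map Prod.fst).Nodup
instance (attrs : List (String × Option String)) : Decidable (Pre_order_attributes_py attrs) := by
  unfold Pre_order_attributes_py; infer_instance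

def pvWitness_order_attributes_py : (List (String × Option String)) :=
  [("tvg-name", some "Chan"), ("url", some "u"), ("tvg-id", none), ("x", some "1")]

def Spec_order_attributes_py (attrs : List (String × Option String)) (out : List (String × String)) : Prop := out = order_attributes_py_alt attrs
instance (attrs : List (String × Option String)) (out : List (String × String)) : Decidable (Spec_order_attributes_py attrs out) := by unfold Spec_order_attributes_py; infer_instance

-- ===== CLAIM (what is proved, stated in full; the proofs are below) =====
def Claim_equal_order_attributes_py : Prop := ∀ (attrs : List (String × Option String)), Dom_order_attributes_py attrs → Pre_order_attributes_py attrs → Spec_order_attributes_py attrs (order_attributes_py attrs)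

-- ===== LEMMAS AND PROOFS =====

-- inserting past a prefix none of whose elements come after x
theorem pv_insertBy_append {α : Type} (before : α → α → Bool) (x : α) (ys zs : List α)
    (h : ∀ y ∈ ys, before x y = false) :
    PySem.List.insertBy before x (ys ++ zs) = ys ++ PySem.List.insertBy before x zs := by
  induction ys with
  | nil => simp
  | cons y ys ih =>
    have hy := h y (by simp)
    simp [PySem.List.insertBy, hy, ih (fun a ha => h a (by simp [ha]))]

-- inserting in front when every element comes after x
theorem pv_insertBy_front {α : Type} (before : α → α → Bool) (x : α) (ys : List α)
    (h : ∀ y ∈ ys, before x y = true) :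
    PySem.List.insertBy before x ys = x :: ys := by
  cases ys with
  | nil => simp [PySem.List.insertBy]
  | cons y ys => simp [PySem.List.insertBy, h y (by simp)]

theorem pv_flatMap_if_not_mem {α : Type} (g : Nat → List α) (x : α) (v : Nat) (rs : List Nat)
    (h : v ∉ rs) :
    rs.flatMap (fun r => g r ++ if v = r then [x] else []) = rs.flatMap g := by
  induction rs with
  | nil => simp
  | cons a as ih =>
    have hva : ¬ v = a := fun he => h (by simp [he])
    simp only [List.flatMap_cons, hva, if_false, List.append_nil]
    rw [ih (fun hm => h (by simp [hm]))]

-- inserting x into a concatenation of strictly increasing buckets appends it to its own bucket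
theorem pv_bucketInsert {α : Type} (key : α → Nat) (x : α) (rs : List Nat) (g : Nat → List α)
    (hg : ∀ r ∈ rs, ∀ y ∈ g r, key y = r) (hs : rs.Pairwise (· < ·)) (hx : key x ∈ rs) :
    PySem.List.insertBy (fun a b => decide (key a < key b)) x (rs.flatMap g)
      = rs.flatMap (fun r => g r ++ if key x = r then [x] else []) := by
  induction rs with
  | nil => simp at hx
  | cons r rs ih =>
    rw [List.flatMap_cons, List.flatMap_cons]
    by_cases hxr : key x = r
    · have h1 : ∀ y ∈ g r, (fun a b => decide (key a < key b)) x y = false := by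
        intro y hy
        have := hg r (by simp) y hy
        simp [this, hxr]
      rw [pv_insertBy_append _ _ _ _ h1]
      have hnot : key x ∉ rs := by
        intro hmem
        have := (List.pairwise_cons.mp hs).1 _ hmem
        omega
      have h2 : ∀ y ∈ rs.flatMap g, (fun a b => decide (key a < key b)) x y = true := by
        intro y hy
        rcases List.mem_flatMap.mp hy with ⟨r', hr', hy'⟩
        have := hg r' (by simp [hr']) y hy'
        have hlt : key x < key y := by
          have := (List.pairwise_cons.mp hs).1 _ hr'
          omega
        simp [hlt]
      rw [pv_insertBy_front _ _ _ h2]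
      rw [pv_flatMap_if_not_mem g x (key x) rs hnot] at *
      simp [hxr]
    · have hxrs : key x ∈ rs := by
        rcases List.mem_cons.mp hx with h | h
        · exact absurd h hxr
        · exact h
      have h1 : ∀ y ∈ g r, (fun a b => decide (key a < key b)) x y = false := by
        intro y hy
        have hky := hg r (by simp) y hy
        have : r < key x := by
          have := (List.pairwise_cons.mp hs).1 _ hxrs
          omega
        simp [hky]; omega
      rw [pv_insertBy_append _ _ _ _ h1]
      rw [ih (fun r' hr' => hg r' (by simp [hr'])) (List.pairwise_cons.mp hs).2 hxrs]
      simp [hxr]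

-- stable sort by a Nat key bounded by n is the concatenation of the n key-buckets in input order
theorem pv_sorted_buckets {α : Type} (xs : List α) (key : α → Nat) (n : Nat)
    (h : ∀ x ∈ xs, key x < n) :
    PySem.List.sorted xs key false
      = (List.range n).flatMap (fun r => xs.filter (fun x => key x = r)) := by
  induction xs using List.reverseRecOn with
  | nil => simp [PySem.List.sorted_eq_foldl_insertBy]
  | append_singleton xs x ih =>
    rw [PySem.List.sorted_eq_foldl_insertBy] at *
    rw [List.foldl_append]
    simp only [List.foldl_cons, List.foldl_nil]
    rw [ih (fun a ha => h a (by simp [ha]))]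
    rw [pv_bucketInsert key x (List.range n) _ ?_ ?_ ?_]
    · simp only [List.filter_append, List.filter_singleton]
      simp only [Bool.cond_decide]
    · intro r hr y hy
      simp only [List.mem_filter] at hy
      exact of_decide_eq_true hy.2
    · exact List.pairwise_lt_range
    · exact List.mem_range.mpr (h x (by simp))

theorem pv_rank_spec (k : String) :
    pvRank k = if k = "tvg-id" then 0 else if k = "tvg-name" then 1
               else if k = "tvg-logo" then 2 else if k = "group-title" then 3 else 4 := by
  simp only [pvRank, pvPref, PySem.List.index?, List.idxOf?]
  split_ifs with h1 h2 h3 h4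
  · subst h1; decide
  · subst h2; decide
  · subst h3; decide
  · subst h4; decide
  · have g1 : ("tvg-id" : String) ≠ k := fun he => h1 he.symm
    have g2 : ("tvg-name" : String) ≠ k := fun he => h2 he.symm
    have g3 : ("tvg-logo" : String) ≠ k := fun he => h3 he.symm
    have g4 : ("group-title" : String) ≠ k := fun he => h4 he.symm
    simp [List.findIdx?_cons, g1, g2, g3, g4]

theorem pv_rank_lt (k : String) : pvRank k < 5 := by
  rw [pv_rank_spec]; split_ifs <;> omega

theorem pv_rank0 (k : String) : pvRank k = 0 ↔ k = "tvg-id" := by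
  rw [pv_rank_spec]; split_ifs <;> simp_all
theorem pv_rank1 (k : String) : pvRank k = 1 ↔ k = "tvg-name" := by
  rw [pv_rank_spec]; split_ifs <;> simp_all
theorem pv_rank2 (k : String) : pvRank k = 2 ↔ k = "tvg-logo" := by
  rw [pv_rank_spec]; split_ifs <;> simp_all
theorem pv_rank3 (k : String) : pvRank k = 3 ↔ k = "group-title" := by
  rw [pv_rank_spec]; split_ifs <;> simp_all
theorem pv_rank4 (k : String) : pvRank k = 4 ↔ k ∉ pvPref := by
  rw [pv_rank_spec]; split_ifs <;> simp_all [pvPref]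

-- abbreviations used only by the proofs
def pvPairs (attrs : List (String × Option String)) : List (String × String) :=
  attrs.filterMap (fun kv => kv.2.map (fun v => (kv.1, v)))

def pvOpt (attrs : List (String × Option String)) (k : String) : List (String × String) :=
  match List.lookup k attrs with
  | some (some v) => [(k, v)]
  | _ => []

def pvHit (attrs : List (String × Option String)) (k : String) : Bool :=
  match List.lookup k attrs with
  | some (some _) => true
  | _ => false

-- phase 1 of A: result list and 'used' set, described per key
theorem pv_phase1 (attrs : List (String × Option String)) (keys : List String)
    (acc : List (String × String)) (used : PySem.Set String) :
    keys.foldl (fun (st : List (String × String) × PySem.Set String) key =>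
        match List.lookup key attrs with
        | some (some v) => (st.1 ++ [(key, v)], st.2.add key)
        | _ => st) (acc, used)
      = (acc ++ keys.flatMap (pvOpt attrs),
         keys.foldl (fun u k => if pvHit attrs k then u.add k else u) used) := by
  induction keys generalizing acc used with
  | nil => simp
  | cons k ks ih =>
    simp only [List.foldl_cons, List.flatMap_cons]
    cases h : List.lookup k attrs with
    | none => simp [pvOpt, pvHit, h, ih]
    | some ov => cases ov with
      | none => simp [pvOpt, pvHit, h, ih]
      | some v => simp [pvOpt, pvHit, h, ih]

theorem pv_used_mem (attrs : List (String × Option String)) (keys : List String)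
    (u : PySem.Set String) (k : String) :
    k ∈ keys.foldl (fun u k' => if pvHit attrs k' then u.add k' else u) u
      ↔ k ∈ u ∨ (k ∈ keys ∧ pvHit attrs k = true) := by
  induction keys generalizing u with
  | nil => simp
  | cons k' ks ih =>
    simp only [List.foldl_cons]
    by_cases h : pvHit attrs k' = true
    · rw [if_pos h, ih]
      simp only [PySem.Set.mem_add, List.mem_cons]
      by_cases hk : k = k' <;> simp_all
    · rw [if_neg h, ih]
      simp only [List.mem_cons]
      by_cases hk : k = k' <;> simp_all

-- phase 2 of A: appends exactly the non-None pairs whose key is not in 'used'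
theorem pv_phase2 (used : PySem.Set String) (attrs : List (String × Option String))
    (acc : List (String × String)) :
    attrs.foldl (fun acc kv =>
        if kv.1 ∈ used ∨ kv.2 = none then acc
        else match kv.2 with
             | some v => acc ++ [(kv.1, v)]
             | none => acc) acc
      = acc ++ (pvPairs attrs).filter (fun kv => decide (kv.1 ∉ used)) := by
  induction attrs generalizing acc with
  | nil => simp [pvPairs]
  | cons kv rest ih =>
    obtain ⟨k0, ov⟩ := kv
    simp only [List.foldl_cons]
    cases ov with
    | none => simp [pvPairs, ih]
    | some v =>
      by_cases hm : k0 ∈ used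
      · simp [pvPairs, hm, ih]
      · simp [pvPairs, hm, ih]

theorem pv_pairs_key_mem (attrs : List (String × Option String)) (kv : String × String)
    (h : kv ∈ pvPairs attrs) : (kv.1, some kv.2) ∈ attrs := by
  simp only [pvPairs, List.mem_filterMap] at h
  obtain ⟨⟨a, b⟩, hab, he⟩ := h
  cases b with
  | none => simp at he
  | some v =>
    simp only [Option.map_some, Option.some.injEq] at he
    cases he
    exact hab

theorem pv_lookup_of_mem_nodup (attrs : List (String × Option String)) (k : String)
    (v : Option String) (h : (k, v) ∈ attrs) (nd : (attrs.map Prod.fst).Nodup) :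
    List.lookup k attrs = some v := by
  induction attrs with
  | nil => simp at h
  | cons kv rest ih =>
    obtain ⟨k0, ov⟩ := kv
    simp only [List.map_cons, List.nodup_cons] at nd
    rcases List.mem_cons.mp h with he | hm
    · rw [Prod.mk.injEq] at he
      obtain ⟨h1, h2⟩ := he
      subst h1; subst h2
      simp [List.lookup]
    · have hne : k ≠ k0 := fun he => nd.1 (he ▸ List.mem_map.mpr ⟨(k, v), hm, rfl⟩)
      have hb : (k == k0) = false := beq_eq_false_iff_ne.mpr hne
      simp [List.lookup, hb, ih hm nd.2]

theorem pv_filter_key (attrs : List (String × Option String))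
    (nd : (attrs.map Prod.fst).Nodup) (k : String) :
    (pvPairs attrs).filter (fun kv => decide (kv.1 = k)) = pvOpt attrs k := by
  induction attrs with
  | nil => simp [pvPairs, pvOpt]
  | cons kv rest ih =>
    obtain ⟨k0, ov⟩ := kv
    simp only [List.map_cons, List.nodup_cons] at nd
    have nd' := nd.2
    have hk0 : k0 ∉ rest.map Prod.fst := nd.1
    by_cases he : k0 = k
    · subst he
      have hrest : (pvPairs rest).filter (fun kv => decide (kv.1 = k0)) = [] := by
        rw [List.filter_eq_nil_iff]
        intro kv hkv hdec
        have hmem := pv_pairs_key_mem rest kv hkv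
        have : kv.1 = k0 := of_decide_eq_true hdec
        exact hk0 (this ▸ (List.mem_map.mpr ⟨(kv.1, some kv.2), hmem, rfl⟩))
      cases ov with
      | none =>
        have hR : pvOpt ((k0, none) :: rest) k0 = [] := by simp [pvOpt, List.lookup]
        have hL : pvPairs ((k0, none) :: rest) = pvPairs rest := by simp [pvPairs]
        rw [hL, hR, hrest]
      | some v =>
        have hR : pvOpt ((k0, some v) :: rest) k0 = [(k0, v)] := by simp [pvOpt, List.lookup]
        have hL : pvPairs ((k0, some v) :: rest) = (k0, v) :: pvPairs rest := by simp [pvPairs]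
        rw [hL, hR, List.filter_cons_of_pos (by simp), hrest]
    · have hne : k ≠ k0 := fun h => he h.symm
      have hb : (k == k0) = false := beq_eq_false_iff_ne.mpr hne
      cases ov with
      | none =>
        have hR : pvOpt ((k0, none) :: rest) k = pvOpt rest k := by
          simp [pvOpt, List.lookup, hb]
        have hL : pvPairs ((k0, none) :: rest) = pvPairs rest := by simp [pvPairs]
        rw [hL, hR]
        exact ih nd'
      | some v =>
        have hR : pvOpt ((k0, some v) :: rest) k = pvOpt rest k := by
          simp [pvOpt, List.lookup, hb]
        have hL : pvPairs ((k0, some v) :: rest) = (k0, v) :: pvPairs rest := by simp [pvPairs]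
        rw [hL, hR, List.filter_cons_of_neg (by simp [he])]
        exact ih nd'

-- ===== VERDICT (by name: the statement is the Claim_ definition above) =====
theorem order_attributes_py_spec : Claim_equal_order_attributes_py := by
  intro attrs _ hpre
  unfold Pre_order_attributes_py at hpre
  unfold Spec_order_attributes_py order_attributes_py order_attributes_py_alt
  dsimp only
  rw [pv_phase1 attrs pvPref [] (PySem.Set.ofList [])]
  dsimp only
  rw [pv_phase2]
  rw [pv_sorted_buckets _ _ 5 (fun kv _ => pv_rank_lt kv.1)]
  have hp : attrs.filterMap (fun kv => kv.2.map (fun v => (kv.1, v))) = pvPairs attrs := rfl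
  rw [hp]
  set usedS := pvPref.foldl (fun u k => if pvHit attrs k then u.add k else u)
      (PySem.Set.ofList []) with husedS
  have hhit : ∀ kv ∈ pvPairs attrs, pvHit attrs kv.1 = true := by
    intro kv hkv
    have hlk := pv_lookup_of_mem_nodup attrs kv.1 (some kv.2) (pv_pairs_key_mem attrs kv hkv) hpre
    simp [pvHit, hlk]
  have husedmem : ∀ kv ∈ pvPairs attrs, (kv.1 ∈ usedS ↔ kv.1 ∈ pvPref) := by
    intro kv hkv
    rw [husedS, pv_used_mem]
    simp [hhit kv hkv]
  have e0 : (pvPairs attrs).filter (fun kv => decide (pvRank kv.1 = 0)) = pvOpt attrs "tvg-id" := by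
    have hc : ∀ kv ∈ pvPairs attrs, decide (pvRank kv.1 = 0) = decide (kv.1 = "tvg-id") := by
      intro kv _; rw [decide_eq_decide]; exact pv_rank0 kv.1
    rw [List.filter_congr hc, pv_filter_key attrs hpre]
  have e1 : (pvPairs attrs).filter (fun kv => decide (pvRank kv.1 = 1)) = pvOpt attrs "tvg-name" := by
    have hc : ∀ kv ∈ pvPairs attrs, decide (pvRank kv.1 = 1) = decide (kv.1 = "tvg-name") := by
      intro kv _; rw [decide_eq_decide]; exact pv_rank1 kv.1
    rw [List.filter_congr hc, pv_filter_key attrs hpre]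
  have e2 : (pvPairs attrs).filter (fun kv => decide (pvRank kv.1 = 2)) = pvOpt attrs "tvg-logo" := by
    have hc : ∀ kv ∈ pvPairs attrs, decide (pvRank kv.1 = 2) = decide (kv.1 = "tvg-logo") := by
      intro kv _; rw [decide_eq_decide]; exact pv_rank2 kv.1
    rw [List.filter_congr hc, pv_filter_key attrs hpre]
  have e3 : (pvPairs attrs).filter (fun kv => decide (pvRank kv.1 = 3)) = pvOpt attrs "group-title" := by
    have hc : ∀ kv ∈ pvPairs attrs, decide (pvRank kv.1 = 3) = decide (kv.1 = "group-title") := by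
      intro kv _; rw [decide_eq_decide]; exact pv_rank3 kv.1
    rw [List.filter_congr hc, pv_filter_key attrs hpre]
  have e4 : (pvPairs attrs).filter (fun kv => decide (pvRank kv.1 = 4))
      = (pvPairs attrs).filter (fun kv => decide (kv.1 ∉ usedS)) := by
    apply List.filter_congr
    intro kv hkv
    rw [decide_eq_decide, pv_rank4, husedmem kv hkv]
  have h5 : List.range 5 = [0, 1, 2, 3, 4] := by decide
  rw [h5]
  simp only [List.flatMap_cons, List.flatMap_nil, List.append_nil, List.nil_append]
  rw [e0, e1, e2, e3, e4]
  show ((pvPref.flatMap (pvOpt attrs)) ++ _) = _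
  simp only [pvPref, List.flatMap_cons, List.flatMap_nil, List.append_nil]
  simp [List.append_assoc]
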